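-- pv_equiv track=rewrite | github.com/mohit62/CTCI_Practice | Arrays and String/IsUnique.py | isUnique1
-- ===== SOURCE A (Python) =====
-- def isUnique1(string):
-- 	unique={};
-- 	for char in string:
-- 		if char in unique.keys():
-- 			return False
-- 		else:
-- 			unique[char]=1;
-- 	return True
-- ===== SOURCE B (Python) =====
-- def isUnique1(string):
--     return len(set(string)) == len(string)
-- ===== Notes on version B (the rewrite author's own statement) =====
-- stated objective: idiomatic
-- what changed: Replaces the incremental dict-membership loop with early return by a single expression comparing len(set(string)) to len(string), with no loop, branch or early exit.
import Mathlib
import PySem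

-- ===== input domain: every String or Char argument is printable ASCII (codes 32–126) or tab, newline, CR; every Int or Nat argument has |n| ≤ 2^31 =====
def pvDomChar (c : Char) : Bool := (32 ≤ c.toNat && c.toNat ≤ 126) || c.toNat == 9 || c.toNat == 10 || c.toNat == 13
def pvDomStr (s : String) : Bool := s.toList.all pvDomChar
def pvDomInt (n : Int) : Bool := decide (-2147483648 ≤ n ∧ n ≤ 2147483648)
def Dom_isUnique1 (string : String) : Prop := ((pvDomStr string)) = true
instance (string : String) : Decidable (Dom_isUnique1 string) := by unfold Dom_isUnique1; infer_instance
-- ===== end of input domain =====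

-- B replaces A's incremental dict-membership loop (with early return) by the single
-- idiomatic expression len(set(string)) == len(string); same O(n) cost.


-- ===== PORT A =====
-- for char in string: if char in unique.keys(): return False else unique[char]=1
def isUnique1Go : List Char → PySem.Dict Char Int → Bool
  | [], _ => true
  | char :: rest, unique =>
      if unique.contains char then false
      else isUnique1Go rest (unique.insert char 1)

def isUnique1 (string : String) : Bool :=
  isUnique1Go string.toList PySem.Dict.empty

-- ===== PORT B =====
def isUnique1_alt (string : String) : Bool :=
  PySem.Set.len (PySem.Set.ofList string.toList) == PySem.Str.len string

-- ===== PRECONDITION & SPEC =====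
def Spec_isUnique1 (string : String) (out : Bool) : Prop := out = isUnique1_alt string
instance (string : String) (out : Bool) : Decidable (Spec_isUnique1 string out) := by unfold Spec_isUnique1; infer_instance

-- ===== CLAIM (what is proved, stated in full; the proofs are below) =====
def Claim_equal_isUnique1 : Prop := ∀ (string : String), Dom_isUnique1 string → Spec_isUnique1 string (isUnique1 string)

-- ===== LEMMAS AND PROOFS =====

-- A's loop succeeds iff the remaining characters are pairwise distinct and none is already a key.
theorem isUnique1Go_eq (l : List Char) :
    ∀ (d : PySem.Dict Char Int),
      isUnique1Go l d = decide (l.Nodup ∧ ∀ c ∈ l, d.contains c = false) := by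
  induction l with
  | nil => intro d; simp [isUnique1Go]
  | cons c rest ih =>
      intro d
      by_cases hc : d.contains c = true
      · simp only [isUnique1Go, hc, if_true]
        symm
        simp only [decide_eq_false_iff_not]
        rintro ⟨_, hall⟩
        exact absurd (hall c (by simp)) (by simp [hc])
      · simp only [isUnique1Go, hc, ih]
        rw [if_neg (by simp), decide_eq_decide]
        constructor
        · rintro ⟨hnd, hall⟩
          refine ⟨?_, ?_⟩
          · exact List.nodup_cons.2 ⟨fun hmem => by
              have := hall c hmem
              simp at this, hnd⟩
          · intro x hx
            rcases List.mem_cons.1 hx with hx | hx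
            · exact hx ▸ Bool.eq_false_iff.2 hc
            · have := hall x hx
              simp [PySem.Dict.contains_insert] at this
              exact this.2
        · rintro ⟨hnd, hall⟩
          have hnd' := List.nodup_cons.1 hnd
          refine ⟨hnd'.2, ?_⟩
          intro x hx
          simp [PySem.Dict.contains_insert]
          refine ⟨fun h => hnd'.1 (h ▸ hx), hall x (by simp [hx])⟩

-- set(l) has full length iff l is all-distinct.
theorem ofList_length_iff (l : List Char) :
    (PySem.Set.ofList l).length = l.length ↔ l.Nodup := by
  constructor
  · intro h
    by_contra hnd
    -- show strict inequality by induction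
    have key : ∀ (m : List Char), ¬ m.Nodup → (PySem.Set.ofList m).length < m.length := by
      intro m
      induction m with
      | nil => intro hm; exact absurd List.nodup_nil hm
      | cons x xs ih =>
          intro hm
          rw [PySem.Set.ofList_cons]
          simp only [List.length_cons]
          by_cases hx : x ∈ xs
          · have hmem : x ∈ PySem.Set.ofList xs := (PySem.Set.mem_ofList xs x).2 hx
            have hlt : (List.filter (fun y => !y == x) (PySem.Set.ofList xs)).length
                < (PySem.Set.ofList xs).length := by
              refine List.length_filter_lt_length_iff_exists.2 ⟨x, hmem, by simp⟩
            have hle := PySem.Set.length_ofList_le xs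
            simp only [PySem.Set.discard]
            omega
          · have hxs : ¬ xs.Nodup := fun h => hm (List.nodup_cons.2 ⟨hx, h⟩)
            have := ih hxs
            have hle : (List.filter (fun y => !y == x) (PySem.Set.ofList xs)).length
                ≤ (PySem.Set.ofList xs).length := List.length_filter_le _ _
            simp only [PySem.Set.discard]
            omega
    exact absurd h (by have := key l hnd; omega)
  · intro h
    rw [PySem.Set.ofList_eq_self_of_nodup l h]

-- ===== VERDICT (by name: the statement is the Claim_ definition above) =====
theorem isUnique1_spec : Claim_equal_isUnique1 := by
  intro s _
  unfold Spec_isUnique1 isUnique1 isUnique1_alt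
  rw [isUnique1Go_eq, Bool.eq_iff_iff]
  simp only [PySem.Set.len, PySem.Str.len, decide_eq_true_eq, beq_iff_eq, Int.natCast_inj]
  rw [← ofList_length_iff]
  simp
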